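-- pv_equiv track=rewrite | github.com/MihaiCatalinVoicu/Automation_MVP | strategy_lifecycle.py | _recommended_state
-- ===== SOURCE A (Python) =====
-- from typing import Any
--
-- VERDICT_RANK = {
--     "KEEP": 0,
--     "WATCH": 1,
--     "TUNE": 2,
--     "FREEZE": 3,
--     "REMOVE": 4,
-- }
--
-- def _recommended_state(current_verdict: str, current_operational_status: str, evaluations: list[dict[str, Any]]) -> tuple[str, str, str]:
--     recommended_verdict = current_verdict
--     recommended_status = current_operational_status
--     review_status = "NO_CHANGE"
--     for item in evaluations:
--         if item["status"] != "triggered":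
--             continue
--         action = (item.get("trigger_action") or "").upper()
--         if action == "AUDIT":
--             recommended_status = "audit_required"
--             review_status = "TRIGGERED"
--             continue
--         if action in VERDICT_RANK and VERDICT_RANK[action] > VERDICT_RANK.get(recommended_verdict, 0):
--             recommended_verdict = action
--             review_status = "TRIGGERED"
--     return recommended_verdict, recommended_status, review_status
-- ===== SOURCE B (Python) =====
-- from typing import Any
--
-- VERDICT_RANK = {
--     "KEEP": 0,
--     "WATCH": 1,
--     "TUNE": 2,
--     "FREEZE": 3,
--     "REMOVE": 4,
-- }
--
-- def _recommended_state(current_verdict: str, current_operational_status: str, evaluations: list[dict[str, Any]]) -> tuple[str, str, str]: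
--     # Filter-then-aggregate: one declarative pass over the triggered actions.
--     actions = [(item.get("trigger_action") or "").upper()
--                for item in evaluations if item["status"] == "triggered"]
--     audit = "AUDIT" in actions
--     ranks = [VERDICT_RANK[a] for a in actions if a in VERDICT_RANK]
--     base = VERDICT_RANK.get(current_verdict, 0)
--     best = max(ranks, default=-1)
--     if best > base:
--         verdict = next(k for k, v in VERDICT_RANK.items() if v == best)
--     else:
--         verdict = current_verdict
--     status = "audit_required" if audit else current_operational_status
--     review = "TRIGGERED" if audit or best > base else "NO_CHANGE"
--     return verdict, status, review
-- ===== Notes on version B (the rewrite author's own statement) =====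
-- stated objective: alternative
-- what changed: Replaced A's single fold with a mutating (verdict,status,review) accumulator by a filter-then-aggregate pass: collect the triggered actions, take any-AUDIT and the max verdict rank, then derive the three outputs from those two aggregates.
import Mathlib
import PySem

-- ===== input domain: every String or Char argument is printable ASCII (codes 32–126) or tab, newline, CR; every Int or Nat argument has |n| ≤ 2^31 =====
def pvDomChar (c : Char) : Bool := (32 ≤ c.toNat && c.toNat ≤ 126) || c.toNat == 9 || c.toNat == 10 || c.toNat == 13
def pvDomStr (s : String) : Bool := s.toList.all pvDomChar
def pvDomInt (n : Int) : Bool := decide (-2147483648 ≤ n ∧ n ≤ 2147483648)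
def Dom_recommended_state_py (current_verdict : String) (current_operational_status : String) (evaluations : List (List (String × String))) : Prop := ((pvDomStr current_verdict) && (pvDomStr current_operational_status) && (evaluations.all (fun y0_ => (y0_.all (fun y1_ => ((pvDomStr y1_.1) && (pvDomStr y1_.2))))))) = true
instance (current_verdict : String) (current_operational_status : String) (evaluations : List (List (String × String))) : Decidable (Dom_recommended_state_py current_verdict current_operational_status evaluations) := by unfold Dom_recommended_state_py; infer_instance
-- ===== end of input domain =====

-- B replaces A's running accumulator with a filter-then-aggregate pass (any-AUDIT + max verdict rank); same results, objective: alternative decomposition.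

-- shared module constant VERDICT_RANK
def verdictRank : PySem.Dict String Int :=
  PySem.Dict.mk [("KEEP", 0), ("WATCH", 1), ("TUNE", 2), ("FREEZE", 3), ("REMOVE", 4)]

-- ===== PORT A =====
-- item["status"] raises KeyError when the key is missing (excluded by Pre_); the total
-- port reads it with getD "" there, so nothing is claimed about those inputs.
def stepA (st : String × String × String) (item : List (String × String)) : String × String × String :=
  if (PySem.Dict.mk item).getD "status" "" ≠ "triggered" then st
  else
    -- (item.get("trigger_action") or "").upper(): a missing key and the empty string both give ""
    let action := PySem.Str.upper (((PySem.Dict.mk item).get? "trigger_action").getD "")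
    if action = "AUDIT" then (st.1, "audit_required", "TRIGGERED")
    else if verdictRank.contains action && decide (verdictRank.getD action 0 > verdictRank.getD st.1 0) then
      (action, st.2.1, "TRIGGERED")
    else st

def recommended_state_py (current_verdict : String) (current_operational_status : String) (evaluations : List (List (String × String))) : String × String × String :=
  evaluations.foldl stepA (current_verdict, current_operational_status, "NO_CHANGE")

-- ===== PORT B =====
def recommended_state_py_alt (current_verdict : String) (current_operational_status : String) (evaluations : List (List (String × String))) : String × String × String :=
  let actions := (evaluations.filter (fun item => (PySem.Dict.mk item).getD "status" "" == "triggered")).map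
      (fun item => PySem.Str.upper (((PySem.Dict.mk item).get? "trigger_action").getD ""))
  let audit := actions.contains "AUDIT"
  let ranks := actions.filterMap (fun a => verdictRank.get? a)
  let base := verdictRank.getD current_verdict 0
  let best := ranks.foldl max (-1 : Int)
  let verdict := if best > base then ((verdictRank.items.find? (fun p => p.2 == best)).map Prod.fst).getD current_verdict else current_verdict
  let status := if audit then "audit_required" else current_operational_status
  let review := if audit || decide (best > base) then "TRIGGERED" else "NO_CHANGE"
  (verdict, status, review)

-- ===== PRECONDITION & SPEC =====
-- Pre_ excludes exactly the inputs where Python A raises KeyError: an evaluation without a "status" key.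
def Pre_recommended_state_py (current_verdict : String) (current_operational_status : String) (evaluations : List (List (String × String))) : Prop :=
  ∀ item ∈ evaluations, ((PySem.Dict.mk item).get? "status").isSome = true
instance (current_verdict : String) (current_operational_status : String) (evaluations : List (List (String × String))) : Decidable (Pre_recommended_state_py current_verdict current_operational_status evaluations) := by unfold Pre_recommended_state_py; infer_instance
def pvWitness_recommended_state_py : String × String × (List (List (String × String))) :=
  ("KEEP", "active", [[("status", "triggered"), ("trigger_action", "remove")]])

def Spec_recommended_state_py (current_verdict : String) (current_operational_status : String) (evaluations : List (List (String × String))) (out : String × String × String) : Prop := out = recommended_state_py_alt current_verdict current_operational_status evaluations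
instance (current_verdict : String) (current_operational_status : String) (evaluations : List (List (String × String))) (out : String × String × String) : Decidable (Spec_recommended_state_py current_verdict current_operational_status evaluations out) := by unfold Spec_recommended_state_py; infer_instance

-- ===== CLAIM (what is proved, stated in full; the proofs are below) =====
def Claim_equal_recommended_state_py : Prop := ∀ (current_verdict : String) (current_operational_status : String) (evaluations : List (List (String × String))), Dom_recommended_state_py current_verdict current_operational_status evaluations → Pre_recommended_state_py current_verdict current_operational_status evaluations → Spec_recommended_state_py current_verdict current_operational_status evaluations (recommended_state_py current_verdict current_operational_status evaluations)

-- ===== LEMMAS AND PROOFS =====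

-- proof-only abbreviations for the per-item observations
def trigB (item : List (String × String)) : Bool := (PySem.Dict.mk item).getD "status" "" == "triggered"
def actS (item : List (String × String)) : String := PySem.Str.upper (((PySem.Dict.mk item).get? "trigger_action").getD "")
def ranksL (l : List (List (String × String))) : List Int :=
  l.filterMap (fun e => if trigB e then verdictRank.get? (actS e) else none)
def auditL (l : List (List (String × String))) : Bool :=
  l.any (fun e => trigB e && (actS e == "AUDIT"))
def bestsL (l : List (List (String × String))) : Int := (ranksL l).foldl max (-1)
def nameOr (dflt : String) (b : Int) : String :=
  ((verdictRank.items.find? (fun p => p.2 == b)).map Prod.fst).getD dflt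

lemma vr_cases (a : String) (r : Int) (h : verdictRank.get? a = some r) :
    (a = "KEEP" ∧ r = 0) ∨ (a = "WATCH" ∧ r = 1) ∨ (a = "TUNE" ∧ r = 2) ∨ (a = "FREEZE" ∧ r = 3) ∨ (a = "REMOVE" ∧ r = 4) := by
  unfold verdictRank at h
  simp only [PySem.Dict.get?_mk_cons] at h
  split_ifs at h with h1 h2 h3 h4 h5
  · exact Or.inl ⟨(eq_of_beq h1).symm, by simpa using h.symm⟩
  · exact Or.inr (Or.inl ⟨(eq_of_beq h2).symm, by simpa using h.symm⟩)
  · exact Or.inr (Or.inr (Or.inl ⟨(eq_of_beq h3).symm, by simpa using h.symm⟩))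
  · exact Or.inr (Or.inr (Or.inr (Or.inl ⟨(eq_of_beq h4).symm, by simpa using h.symm⟩)))
  · exact Or.inr (Or.inr (Or.inr (Or.inr ⟨(eq_of_beq h5).symm, by simpa using h.symm⟩)))
  · exact absurd h (by simp [PySem.Dict.get?])

lemma vr_contains (a : String) : verdictRank.contains a = (verdictRank.get? a).isSome := by
  unfold verdictRank
  simp only [PySem.Dict.contains_mk, PySem.Dict.get?_mk_cons]
  split_ifs <;> simp_all [PySem.Dict.get?]

lemma find_some_of_rank (a : String) (r : Int) (h : verdictRank.get? a = some r) :
    verdictRank.items.find? (fun p => p.2 == r) = some (a, r) := by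
  rcases vr_cases a r h with ⟨rfl, rfl⟩ | ⟨rfl, rfl⟩ | ⟨rfl, rfl⟩ | ⟨rfl, rfl⟩ | ⟨rfl, rfl⟩ <;> decide

lemma rank_nonneg (a : String) : 0 ≤ verdictRank.getD a 0 := by
  rw [PySem.Dict.getD_eq_get?_getD]
  cases h : verdictRank.get? a with
  | none => simp
  | some r => rcases vr_cases a r h with ⟨_, rfl⟩|⟨_, rfl⟩|⟨_, rfl⟩|⟨_, rfl⟩|⟨_, rfl⟩ <;> simp

lemma nameOr_eq (a : String) (b : Int) (d : String) (h : verdictRank.get? a = some b) :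
    nameOr d b = a := by
  unfold nameOr
  rw [find_some_of_rank a b h]
  rfl

lemma mem_ranksL (l : List (List (String × String))) (b : Int) (hb : b ∈ ranksL l) :
    ∃ a, verdictRank.get? a = some b := by
  unfold ranksL at hb
  rcases List.mem_filterMap.1 hb with ⟨e, _, he⟩
  by_cases ht : trigB e
  · exact ⟨actS e, by simpa [ht] using he⟩
  · simp [ht] at he

lemma foldl_max_mem (l : List Int) (a : Int) : l.foldl max a = a ∨ l.foldl max a ∈ l := by
  induction l generalizing a with
  | nil => exact Or.inl rfl
  | cons c l ih =>
    rcases ih (max a c) with h | h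
    · rw [List.foldl_cons, h]
      rcases max_choice a c with hc | hc <;> simp [hc]
    · simp [List.foldl_cons, h]

lemma bestsL_mem (l : List (List (String × String))) : bestsL l = -1 ∨ bestsL l ∈ ranksL l :=
  foldl_max_mem _ _

lemma foldl_max_init (l : List Int) (a b : Int) : l.foldl max (max a b) = max a (l.foldl max b) := by
  induction l generalizing a b with
  | nil => rfl
  | cons c l ih => simpa [List.foldl_cons, max_assoc] using ih a (max b c)

lemma auditL_cons (e : List (String × String)) (l : List (List (String × String))) :
    auditL (e :: l) = ((trigB e && (actS e == "AUDIT")) || auditL l) := by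
  simp [auditL]

lemma ranksL_cons_not_trig (e : List (String × String)) (l : List (List (String × String)))
    (ht : trigB e = false) : ranksL (e :: l) = ranksL l := by
  simp [ranksL, List.filterMap_cons, ht]

lemma ranksL_cons_none (e : List (String × String)) (l : List (List (String × String)))
    (hg : verdictRank.get? (actS e) = none) : ranksL (e :: l) = ranksL l := by
  by_cases ht : trigB e <;> simp [ranksL, List.filterMap_cons, ht, hg]

lemma ranksL_cons_some (e : List (String × String)) (l : List (List (String × String))) (r : Int)
    (ht : trigB e = true) (hg : verdictRank.get? (actS e) = some r) :
    ranksL (e :: l) = r :: ranksL l := by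
  simp [ranksL, List.filterMap_cons, ht, hg]

lemma bestsL_cons_some (e : List (String × String)) (l : List (List (String × String))) (r : Int)
    (ht : trigB e = true) (hg : verdictRank.get? (actS e) = some r) :
    bestsL (e :: l) = max r (bestsL l) := by
  unfold bestsL
  rw [ranksL_cons_some e l r ht hg, List.foldl_cons, max_comm (-1 : Int) r, foldl_max_init]

lemma foldA_char (l : List (List (String × String))) : ∀ (rv rs rev : String) (m : Int),
    verdictRank.getD rv 0 = m →
    l.foldl stepA (rv, rs, rev) =
      ( if bestsL l > m then nameOr rv (bestsL l) else rv,
        if auditL l = true then "audit_required" else rs,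
        if (auditL l || decide (bestsL l > m)) = true then "TRIGGERED" else rev) := by
  induction l with
  | nil =>
    intro rv rs rev m hm
    have h0 : 0 ≤ m := hm ▸ rank_nonneg rv
    have hb : ¬ (bestsL ([] : List (List (String × String))) > m) := by
      simp only [bestsL, ranksL, List.filterMap_nil, List.foldl_nil]; omega
    simp [auditL, hb]
  | cons e l ih =>
    intro rv rs rev m hm
    have h0 : 0 ≤ m := hm ▸ rank_nonneg rv
    rw [List.foldl_cons]
    by_cases ht : trigB e
    · have hts : (PySem.Dict.mk e).getD "status" "" = "triggered" := by
        simpa [trigB] using ht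
      have hact : PySem.Str.upper (((PySem.Dict.mk e).get? "trigger_action").getD "") = actS e := rfl
      by_cases ha : actS e = "AUDIT"
      · -- audit item
        have hg : verdictRank.get? (actS e) = none := by rw [ha]; rfl
        have hstep : stepA (rv, rs, rev) e = (rv, "audit_required", "TRIGGERED") := by
          simp [stepA, hts, hact, ha]
        rw [hstep, ih rv "audit_required" "TRIGGERED" m hm]
        have hA : auditL (e :: l) = true := by simp [auditL_cons, ht, ha]
        have hB : bestsL (e :: l) = bestsL l := by unfold bestsL; rw [ranksL_cons_none e l hg]
        simp [hA, hB]
      · cases hg : verdictRank.get? (actS e) with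
        | none =>
          have hc : verdictRank.contains (actS e) = false := by rw [vr_contains, hg]; rfl
          have hstep : stepA (rv, rs, rev) e = (rv, rs, rev) := by
            simp [stepA, hts, hact, ha, hc]
          rw [hstep, ih rv rs rev m hm]
          have hA : auditL (e :: l) = auditL l := by simp [auditL_cons, ha]
          have hB : bestsL (e :: l) = bestsL l := by unfold bestsL; rw [ranksL_cons_none e l hg]
          rw [hA, hB]
        | some r =>
          have hc : verdictRank.contains (actS e) = true := by rw [vr_contains, hg]; rfl
          have hr : verdictRank.getD (actS e) 0 = r := PySem.Dict.getD_of_get?_eq_some _ 0 hg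
          have hA : auditL (e :: l) = auditL l := by simp [auditL_cons, ha]
          have hB : bestsL (e :: l) = max r (bestsL l) := bestsL_cons_some e l r ht hg
          by_cases hrm : r > m
          · have hstep : stepA (rv, rs, rev) e = (actS e, rs, "TRIGGERED") := by
              simp [stepA, hts, hact, ha, hc, hr, hm, hrm]
            rw [hstep, ih (actS e) rs "TRIGGERED" r hr, hA, hB]
            have hgt : max r (bestsL l) > m := lt_of_lt_of_le hrm (le_max_left _ _)
            refine Prod.ext ?_ (Prod.ext ?_ ?_)
            · simp only [if_pos hgt]
              by_cases hbl : bestsL l > r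
              · rw [if_pos hbl, max_eq_right (le_of_lt hbl)]
                have hmem : bestsL l ∈ ranksL l := by
                  rcases bestsL_mem l with h | h
                  · omega
                  · exact h
                rcases mem_ranksL l _ hmem with ⟨a, hga⟩
                rw [nameOr_eq a _ _ hga, nameOr_eq a _ _ hga]
              · rw [if_neg hbl, max_eq_left (not_lt.1 hbl), nameOr_eq _ _ _ hg]
            · rfl
            · simp [hgt]
          · have hstep : stepA (rv, rs, rev) e = (rv, rs, rev) := by
              simp [stepA, hts, hact, ha, hc, hr, hm, hrm]
            rw [hstep, ih rv rs rev m hm, hA, hB]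
            have hiff : (max r (bestsL l) > m) ↔ (bestsL l > m) := by
              constructor <;> intro h <;> omega
            refine Prod.ext ?_ (Prod.ext rfl ?_)
            · by_cases hbl : bestsL l > m
              · rw [if_pos hbl, if_pos (hiff.2 hbl), max_eq_right (by omega)]
              · rw [if_neg hbl, if_neg (fun h => hbl (hiff.1 h))]
            · have : decide (max r (bestsL l) > m) = decide (bestsL l > m) := by
                simp [hiff]
              rw [this]
    · have hts : ¬ ((PySem.Dict.mk e).getD "status" "" = "triggered") := by
        simpa [trigB] using ht
      have hstep : stepA (rv, rs, rev) e = (rv, rs, rev) := by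
        simp [stepA, hts]
      rw [hstep, ih rv rs rev m hm]
      have hA : auditL (e :: l) = auditL l := by simp [auditL_cons, ht]
      have hB : bestsL (e :: l) = bestsL l := by
        unfold bestsL; rw [ranksL_cons_not_trig e l (by simpa using ht)]
      rw [hA, hB]

lemma beq_comm_str (a b : String) : (a == b) = (b == a) := BEq.comm ..

lemma actions_audit (l : List (List (String × String))) :
    ((l.filter (fun item => (PySem.Dict.mk item).getD "status" "" == "triggered")).map
      (fun item => PySem.Str.upper (((PySem.Dict.mk item).get? "trigger_action").getD ""))).contains "AUDIT" = auditL l := by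
  induction l with
  | nil => rfl
  | cons e l ih =>
    simp only [List.filter_cons]
    by_cases ht : ((PySem.Dict.mk e).getD "status" "" == "triggered") = true
    · rw [if_pos ht, List.map_cons, List.contains_cons, ih, auditL_cons]
      have ht' : trigB e = true := ht
      rw [ht', Bool.true_and, beq_comm_str]
      rfl
    · rw [if_neg ht, ih, auditL_cons]
      have ht' : trigB e = false := by
        simp only [trigB]; simpa using ht
      rw [ht', Bool.false_and, Bool.false_or]

lemma actions_ranks (l : List (List (String × String))) :
    ((l.filter (fun item => (PySem.Dict.mk item).getD "status" "" == "triggered")).map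
      (fun item => PySem.Str.upper (((PySem.Dict.mk item).get? "trigger_action").getD ""))).filterMap
      (fun a => verdictRank.get? a) = ranksL l := by
  induction l with
  | nil => rfl
  | cons e l ih =>
    simp only [List.filter_cons]
    by_cases ht : ((PySem.Dict.mk e).getD "status" "" == "triggered") = true
    · rw [if_pos ht, List.map_cons, List.filterMap_cons, ih]
      have ht' : trigB e = true := ht
      simp only [ranksL, List.filterMap_cons, ht', if_true, actS]
    · rw [if_neg ht, ih]
      have ht' : trigB e = false := by
        simp only [trigB]; simpa using ht
      simp only [ranksL, List.filterMap_cons, ht', Bool.false_eq_true, if_false]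

lemma B_char (cv cos : String) (l : List (List (String × String))) :
    recommended_state_py_alt cv cos l =
      ( if bestsL l > verdictRank.getD cv 0 then nameOr cv (bestsL l) else cv,
        if auditL l = true then "audit_required" else cos,
        if (auditL l || decide (bestsL l > verdictRank.getD cv 0)) = true then "TRIGGERED" else "NO_CHANGE") := by
  simp only [recommended_state_py_alt]
  rw [actions_audit, actions_ranks]
  rfl

-- ===== VERDICT (by name: the statement is the Claim_ definition above) =====
theorem recommended_state_py_spec : Claim_equal_recommended_state_py := by
  intro cv cos evs _ _
  unfold Spec_recommended_state_py recommended_state_py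
  rw [B_char, foldA_char evs cv cos "NO_CHANGE" (verdictRank.getD cv 0) rfl]
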